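-- pv_equiv track=rewrite | github.com/YuwenChangong/HEPH-desktop-first-hybrid-AI-inference-system | miner/heph.py | merge_continuation_text
-- ===== SOURCE A (Python) =====
-- def merge_continuation_text(existing: str, new_text: str) -> str:
--     if not new_text:
--         return existing
--     if not existing:
--         return new_text
--     max_overlap = min(len(existing), len(new_text), 200)
--     for overlap in range(max_overlap, 0, -1):
--         if existing.endswith(new_text[:overlap]):
--             return existing + new_text[overlap:]
--     return existing + new_text
-- ===== SOURCE B (Python) =====
-- def merge_continuation_text(existing: str, new_text: str) -> str:
--     if not new_text:
--         return existing
--     if not existing: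
--         return new_text
--     m = min(len(existing), len(new_text), 200)
--     # KMP prefix-function over new_text[:m] + sentinel + last-m-of-existing:
--     # the final border length is the longest overlap.
--     s = new_text[:m] + "\x00" + existing[len(existing) - m:]
--     pi = [0]
--     k = 0
--     for i in range(1, len(s)):
--         while k and s[i] != s[k]:
--             k = pi[k - 1]
--         if s[i] == s[k]:
--             k += 1
--         pi.append(k)
--     return existing + new_text[k:]
-- ===== Notes on version B (the rewrite author's own statement) =====
-- stated objective: alternative
-- what changed: A brute-forces the overlap with up to 200 descending endswith scans; B computes it as the final value of the KMP prefix-function of new_text[:m] + '\x00' + existing[-m:], one linear table-building pass, then appends once.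
import Mathlib
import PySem

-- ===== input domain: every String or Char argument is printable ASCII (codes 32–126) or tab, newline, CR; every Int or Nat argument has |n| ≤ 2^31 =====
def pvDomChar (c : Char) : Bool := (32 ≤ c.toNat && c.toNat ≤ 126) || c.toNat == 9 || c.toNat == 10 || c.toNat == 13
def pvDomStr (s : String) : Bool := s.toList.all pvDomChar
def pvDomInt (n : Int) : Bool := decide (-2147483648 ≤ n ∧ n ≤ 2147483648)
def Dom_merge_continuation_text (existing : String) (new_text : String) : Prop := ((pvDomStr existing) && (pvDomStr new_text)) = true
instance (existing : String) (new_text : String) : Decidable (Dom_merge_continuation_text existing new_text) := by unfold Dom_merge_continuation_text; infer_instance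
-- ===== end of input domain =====

-- B replaces A's descending endswith search by the KMP prefix-function of
-- new_text[:m] + '\x00' + existing[-m:], whose final border length is the overlap
-- (alternative algorithm: one linear table-building pass instead of repeated suffix scans).

-- ===== PORT A =====
-- the 'for overlap in range(max_overlap, 0, -1)' loop with its early returns
def mergeLoopA (existing : String) (new_text : String) : List Int → String
  | [] => existing ++ new_text
  | overlap :: rest =>
      if PySem.Str.endswith existing (PySem.Str.slice new_text none (some overlap)) then
        existing ++ PySem.Str.slice new_text (some overlap) none
      else mergeLoopA existing new_text rest

def merge_continuation_text (existing : String) (new_text : String) : String :=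
  if PySem.Str.len new_text = 0 then existing
  else if PySem.Str.len existing = 0 then new_text
  else
    let max_overlap : Int := min (min (PySem.Str.len existing) (PySem.Str.len new_text)) 200
    mergeLoopA existing new_text (PySem.List.pyRange max_overlap 0 (-1))

-- ===== PORT B =====
-- the 'while k and s[i] != s[k]: k = pi[k-1]' loop; fuel = current k (each step strictly
-- decreases k, so fuel k makes the same computation total)
def kmpWhile (s : List Char) (pi : List Nat) (c : Char) : Nat → Nat → Nat
  | 0, k => k
  | fuel + 1, k =>
      if 0 < k ∧ ¬ (s.getD k (Char.ofNat 0) = c) then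
        kmpWhile s pi c fuel (pi.getD (k - 1) 0)
      else k

-- the 'for i in range(1, len(s))' loop carrying (pi, k); pi grows by append as in Source B
def kmpOuter (s : List Char) (i : Nat) (pi : List Nat) (k : Nat) : Nat :=
  if h : i < s.length then
    let c := s.getD i (Char.ofNat 0)
    let k1 := kmpWhile s pi c k k
    let k2 := if s.getD k1 (Char.ofNat 0) = c then k1 + 1 else k1
    kmpOuter s (i + 1) (pi ++ [k2]) k2
  else k
termination_by s.length - i

def merge_continuation_text_alt (existing : String) (new_text : String) : String :=
  if PySem.Str.len new_text = 0 then existing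
  else if PySem.Str.len existing = 0 then new_text
  else
    let m : Int := min (min (PySem.Str.len existing) (PySem.Str.len new_text)) 200
    let s : List Char :=
      (PySem.Str.slice new_text none (some m)).toList
        ++ [Char.ofNat 0]
        ++ (PySem.Str.slice existing (some (PySem.Str.len existing - m)) none).toList
    let k := kmpOuter s 1 [0] 0
    existing ++ PySem.Str.slice new_text (some (k : Int)) none

-- ===== PRECONDITION & SPEC =====
def Spec_merge_continuation_text (existing : String) (new_text : String) (out : String) : Prop := out = merge_continuation_text_alt existing new_text
instance (existing : String) (new_text : String) (out : String) : Decidable (Spec_merge_continuation_text existing new_text out) := by unfold Spec_merge_continuation_text; infer_instance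

-- ===== CLAIM (what is proved, stated in full; the proofs are below) =====
def Claim_equal_merge_continuation_text : Prop := ∀ (existing : String) (new_text : String), Dom_merge_continuation_text existing new_text → Spec_merge_continuation_text existing new_text (merge_continuation_text existing new_text)

-- ===== LEMMAS AND PROOFS =====

-- the largest overlap ≤ j whose prefix of new_text is a suffix of existing (0 if none)
def gBest (E N : List Char) : Nat → Nat
  | 0 => 0
  | j + 1 => if N.take (j + 1) <:+ E then j + 1 else gBest E N j

lemma gBest_le (E N : List Char) (j : Nat) : gBest E N j ≤ j := by
  induction j with
  | zero => simp [gBest]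
  | succ j ih => by_cases h : N.take (j + 1) <:+ E <;> simp [gBest, h] <;> omega

lemma gBest_suffix (E N : List Char) (j : Nat) : N.take (gBest E N j) <:+ E := by
  induction j with
  | zero => simp [gBest]
  | succ j ih => by_cases h : N.take (j + 1) <:+ E <;> simp [gBest, h, ih]

lemma gBest_max (E N : List Char) (j k : Nat) (hk : k ≤ j) (hs : N.take k <:+ E) :
    k ≤ gBest E N j := by
  induction j with
  | zero => omega
  | succ j ih =>
      by_cases h : N.take (j + 1) <:+ E
      · simp [gBest, h]; omega
      · simp [gBest, h]
        have : k ≠ j + 1 := by rintro rfl; exact h hs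
        exact ih (by omega)

lemma aLoop_eq (existing new_text : String) (j : Nat) :
    (mergeLoopA existing new_text (PySem.List.pyRange (j : Int) 0 (-1))).toList
      = existing.toList ++ new_text.toList.drop (gBest existing.toList new_text.toList j) := by
  induction j with
  | zero =>
      rw [PySem.List.pyRange_neg_one_eq_nil (by norm_num)]
      simp [mergeLoopA, gBest]
  | succ j ih =>
      rw [show ((j + 1 : Nat) : Int) = (j : Int) + 1 by push_cast; ring,
          PySem.List.pyRange_neg_one_cons (by positivity)]
      have hsub : ((j : Int) + 1 - 1) = (j : Int) := by ring
      rw [hsub]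
      have hslice : (PySem.Str.slice new_text none (some ((j : Int) + 1))).toList
          = new_text.toList.take (j + 1) := by
        rw [PySem.Str.toList_slice, PySem.Chars.slice_eq_listSlice,
            show ((j : Int) + 1) = ((j + 1 : Nat) : Int) by push_cast; ring,
            PySem.List.slice_to_natCast]
      by_cases h : new_text.toList.take (j + 1) <:+ existing.toList
      · have hend : PySem.Str.endswith existing (PySem.Str.slice new_text none (some ((j : Int) + 1))) = true := by
          rw [PySem.Str.endswith_eq, hslice, PySem.Chars.endswith_iff]
          exact h
        rw [mergeLoopA, if_pos hend]
        have : gBest existing.toList new_text.toList (j + 1) = j + 1 := by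
          simp [gBest, h]
        rw [this]
        rw [String.toList_append, PySem.Str.toList_slice, PySem.Chars.slice_eq_listSlice,
            show ((j : Int) + 1) = ((j + 1 : Nat) : Int) by push_cast; ring,
            PySem.List.slice_from_natCast]
      · have hend : PySem.Str.endswith existing (PySem.Str.slice new_text none (some ((j : Int) + 1))) = false := by
          rw [PySem.Str.endswith_eq, hslice, Bool.eq_false_iff, ne_eq, PySem.Chars.endswith_iff]
          exact h
        rw [mergeLoopA, if_neg (by rw [hend]; simp)]
        have : gBest existing.toList new_text.toList (j + 1) = gBest existing.toList new_text.toList j := by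
          simp [gBest, h]
        rw [this]
        exact ih

-- ---- borders (prefix function values) ----

-- longest proper border of t (0 for [])
def bord (t : List Char) : Nat := Nat.findGreatest (fun b => t.take b <:+ t) (t.length - 1)

lemma bord_le (t : List Char) : bord t ≤ t.length - 1 := Nat.findGreatest_le _

lemma bord_suffix (t : List Char) : t.take (bord t) <:+ t :=
  Nat.findGreatest_spec (P := fun b => t.take b <:+ t) (Nat.zero_le _) (by simp)

lemma bord_max (t : List Char) (b : Nat) (hb : b ≤ t.length - 1) (hs : t.take b <:+ t) :
    b ≤ bord t := Nat.le_findGreatest hb hs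


lemma take_eq_drop_iff_suffix (t : List Char) (b : Nat) (hb : b ≤ t.length) :
    t.take b <:+ t ↔ t.take b = t.drop (t.length - b) := by
  rw [List.suffix_iff_eq_drop, List.length_take, Nat.min_eq_left hb]

-- borders of t ++ [c] of positive length: one more than a border of t whose next char is c
lemma border_append_iff (t : List Char) (c : Char) (b : Nat) (hb : b < t.length) :
    ((t ++ [c]).take (b + 1) <:+ (t ++ [c])) ↔
      (t.take b <:+ t ∧ t.getD b (Char.ofNat 0) = c) := by
  have hlen : (t ++ [c]).length = t.length + 1 := by simp
  have h1 : (t ++ [c]).take (b + 1) = t.take b ++ [t.getD b (Char.ofNat 0)] := by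
    rw [List.take_append_of_le_length (by omega), List.take_succ_eq_append_getElem hb,
        List.getD_eq_getElem _ _ hb]
  have h2 : (t ++ [c]).drop ((t ++ [c]).length - (b + 1)) = t.drop (t.length - b) ++ [c] := by
    rw [hlen, show t.length + 1 - (b + 1) = t.length - b by omega,
        List.drop_append_of_le_length (by omega)]
  rw [take_eq_drop_iff_suffix _ _ (by omega), take_eq_drop_iff_suffix _ _ (by omega), h1, h2]
  constructor
  · intro h
    have hl : (t.take b).length = (t.drop (t.length - b)).length := by
      simp; omega
    obtain ⟨he1, he2⟩ := List.append_inj h (by simpa using hl)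
    exact ⟨he1, by simpa using he2⟩
  · rintro ⟨he1, he2⟩
    rw [he1, he2]

-- every border of t below a border k of t is a border of t.take k
lemma border_le_bord_take (t : List Char) (b k : Nat) (hbk : b < k) (hk : k < t.length)
    (hkb : t.take k <:+ t) (hbb : t.take b <:+ t) : b ≤ bord (t.take k) := by
  have hlb : (t.take b).length = b := by simp; omega
  have hlk : (t.take k).length = k := by simp; omega
  have h1 : t.take b <:+ t.take k :=
    List.suffix_of_suffix_length_le hbb hkb (by rw [hlb, hlk]; omega)
  have h2 : (t.take k).take b = t.take b := by
    rw [List.take_take, Nat.min_eq_left (by omega)]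
  exact bord_max _ _ (by omega) (by rw [h2]; exact h1)

-- the longest border of t.take k is itself a border of t, shorter than k
lemma bord_take_border (t : List Char) (k : Nat) (hk : k < t.length) (hkpos : 0 < k)
    (hkb : t.take k <:+ t) : t.take (bord (t.take k)) <:+ t ∧ bord (t.take k) < k := by
  have hlk : (t.take k).length = k := by simp; omega
  have hle : bord (t.take k) < k := by
    have := bord_le (t.take k); rw [hlk] at this; omega
  have h2 : (t.take k).take (bord (t.take k)) = t.take (bord (t.take k)) := by
    rw [List.take_take, Nat.min_eq_left (by omega)]
  exact ⟨h2 ▸ (bord_suffix (t.take k)).trans hkb, hle⟩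

-- loop invariant for the inner while: k is a border of t dominating all borders followed by c
def KInv (t : List Char) (c : Char) (k : Nat) : Prop :=
  k < t.length ∧ t.take k <:+ t ∧
    ∀ b, b < t.length → t.take b <:+ t → t.getD b (Char.ofNat 0) = c → b ≤ k

lemma prefix_getD (s t : List Char) (hpref : t <+: s) (j : Nat) (hj : j < t.length) :
    s.getD j (Char.ofNat 0) = t.getD j (Char.ofNat 0) := by
  obtain ⟨r, rfl⟩ := hpref
  exact List.getD_append _ _ _ _ hj

lemma kmpWhile_spec (s t : List Char) (c : Char) (pi : List Nat)
    (hpref : t <+: s)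
    (hpi : ∀ j, j < t.length → pi.getD j 0 = bord (t.take (j + 1))) :
    ∀ fuel k, k ≤ fuel → KInv t c k →
      KInv t c (kmpWhile s pi c fuel k) ∧
        (kmpWhile s pi c fuel k = 0 ∨
          t.getD (kmpWhile s pi c fuel k) (Char.ofNat 0) = c) := by
  intro fuel
  induction fuel with
  | zero =>
      intro k hk hInv
      have : k = 0 := by omega
      subst this
      exact ⟨hInv, Or.inl rfl⟩
  | succ fuel ih =>
      intro k hk hInv
      obtain ⟨hk1, hk2, hk3⟩ := hInv
      rw [kmpWhile]
      by_cases hc : 0 < k ∧ ¬ (s.getD k (Char.ofNat 0) = c)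
      · rw [if_pos hc]
        obtain ⟨hkpos, hne⟩ := hc
        have hsk : s.getD k (Char.ofNat 0) = t.getD k (Char.ofNat 0) :=
          prefix_getD s t hpref k hk1
        have hne' : ¬ (t.getD k (Char.ofNat 0) = c) := by rw [← hsk]; exact hne
        have hpik : pi.getD (k - 1) 0 = bord (t.take k) := by
          have := hpi (k - 1) (by omega)
          rwa [show k - 1 + 1 = k by omega] at this
        obtain ⟨hb1, hb2⟩ := bord_take_border t k hk1 hkpos hk2
        rw [hpik]
        apply ih
        · omega
        · refine ⟨by omega, hb1, ?_⟩
          intro b hbl hbs hbc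
          have hbk : b ≤ k := hk3 b hbl hbs hbc
          have hbne : b ≠ k := by rintro rfl; exact hne' hbc
          exact border_le_bord_take t b k (by omega) hk1 hk2 hbs
      · rw [if_neg hc]
        refine ⟨⟨hk1, hk2, hk3⟩, ?_⟩
        rcases Nat.eq_zero_or_pos k with h0 | hpos
        · exact Or.inl h0
        · push_neg at hc
          have := hc hpos
          rw [prefix_getD s t hpref k hk1] at this
          exact Or.inr this

-- value of the prefix function at the next position
lemma bord_step (t : List Char) (c : Char) (r : Nat)
    (hInv : KInv t c r) (hd : r = 0 ∨ t.getD r (Char.ofNat 0) = c) :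
    bord (t ++ [c]) = if t.getD r (Char.ofNat 0) = c then r + 1 else r := by
  obtain ⟨hr1, hr2, hr3⟩ := hInv
  have hlen : (t ++ [c]).length = t.length + 1 := by simp
  have hF := bord_suffix (t ++ [c])
  have hFle : bord (t ++ [c]) ≤ t.length := by
    have := bord_le (t ++ [c]); omega
  by_cases hc : t.getD r (Char.ofNat 0) = c
  · rw [if_pos hc]
    have hb : (t ++ [c]).take (r + 1) <:+ (t ++ [c]) :=
      (border_append_iff t c r hr1).mpr ⟨hr2, hc⟩
    have hle1 : r + 1 ≤ bord (t ++ [c]) := bord_max _ _ (by omega) hb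
    have hle2 : bord (t ++ [c]) ≤ r + 1 := by
      rcases Nat.eq_zero_or_pos (bord (t ++ [c])) with h0 | hpos
      · omega
      · obtain ⟨F, hFeq⟩ : ∃ F, bord (t ++ [c]) = F + 1 := ⟨bord (t ++ [c]) - 1, by omega⟩
        rw [hFeq] at hF hFle ⊢
        obtain ⟨hs1, hs2⟩ := (border_append_iff t c F (by omega)).mp hF
        have := hr3 F (by omega) hs1 hs2
        omega
    omega
  · rw [if_neg hc]
    have hr0 : r = 0 := by
      rcases hd with h | h
      · exact h
      · exact absurd h hc
    subst hr0
    rcases Nat.eq_zero_or_pos (bord (t ++ [c])) with h0 | hpos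
    · omega
    · exfalso
      obtain ⟨F, hFeq⟩ : ∃ F, bord (t ++ [c]) = F + 1 := ⟨bord (t ++ [c]) - 1, by omega⟩
      rw [hFeq] at hF hFle
      obtain ⟨hs1, hs2⟩ := (border_append_iff t c F (by omega)).mp hF
      have := hr3 F (by omega) hs1 hs2
      have hF0 : F = 0 := by omega
      subst hF0
      exact hc hs2

lemma kmpOuter_spec (s : List Char) :
    ∀ n i pi, s.length - i = n → 0 < i → i ≤ s.length → pi.length = i →
      (∀ j, j < i → pi.getD j 0 = bord (s.take (j + 1))) →
      kmpOuter s i pi (bord (s.take i)) = bord s := by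
  intro n
  induction n with
  | zero =>
      intro i pi hn h0 hle hplen hpi
      have hi : i = s.length := by omega
      rw [kmpOuter, dif_neg (by omega), hi, List.take_length]
  | succ n ih =>
      intro i pi hn h0 hle hplen hpi
      have hi : i < s.length := by omega
      rw [kmpOuter, dif_pos hi]
      set t := s.take i with ht
      have htl : t.length = i := by simp [ht]; omega
      have htp : t <+: s := List.take_prefix _ _
      have hpi' : ∀ j, j < t.length → pi.getD j 0 = bord (t.take (j + 1)) := by
        intro j hj
        rw [htl] at hj
        rw [ht, List.take_take, Nat.min_eq_left (by omega)]
        exact hpi j hj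
      set c := s.getD i (Char.ofNat 0) with hc
      have hInv0 : KInv t c (bord t) := by
        refine ⟨?_, bord_suffix t, ?_⟩
        · have := bord_le t; omega
        · intro b hb hbs _
          exact bord_max t b (by omega) hbs
      obtain ⟨hInv, hdisj⟩ :=
        kmpWhile_spec s t c pi htp hpi' (bord t) (bord t) le_rfl hInv0
      set r := kmpWhile s pi c (bord t) (bord t) with hr
      have hsr : s.getD r (Char.ofNat 0) = t.getD r (Char.ofNat 0) :=
        prefix_getD s t htp r hInv.1
      have hstep : bord (t ++ [c]) =
          if s.getD r (Char.ofNat 0) = c then r + 1 else r := by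
        rw [hsr]
        exact bord_step t c r hInv hdisj
      have htc : t ++ [c] = s.take (i + 1) := by
        rw [ht, hc, List.getD_eq_getElem _ _ hi, List.take_succ_eq_append_getElem hi]
      set k2 := if s.getD r (Char.ofNat 0) = c then r + 1 else r with hk2
      have hk2b : k2 = bord (s.take (i + 1)) := by
        rw [hk2, ← htc, hstep]
      have hrec := ih (i + 1) (pi ++ [k2]) (by omega) (by omega) (by omega)
        (by simp [hplen])
        (by
          intro j hj
          rcases Nat.lt_or_ge j i with hji | hji
          · rw [List.getD_append _ _ _ _ (by omega)]
            exact hpi j hji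
          · have hji' : j = i := by omega
            subst hji'
            rw [List.getD_append_right _ _ _ _ (by omega), hplen, Nat.sub_self]
            simpa using hk2b)
      rw [← hk2b] at hrec
      exact hrec

-- the final prefix-function value of N[:J] ++ '\x00' ++ E[-J:] is the best overlap
lemma bord_sentinel (E N : List Char) (J : Nat) (hJE : J ≤ E.length) (hJN : J ≤ N.length)
    (hJ1 : 1 ≤ J) (hzE : Char.ofNat 0 ∉ E) :
    bord (N.take J ++ [Char.ofNat 0] ++ E.drop (E.length - J)) = gBest E N J := by
  set z := Char.ofNat 0 with hz
  set P := N.take J with hP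
  set Q := E.drop (E.length - J) with hQ
  set s := P ++ [z] ++ Q with hs
  have hPl : P.length = J := by simp [hP]; omega
  have hQl : Q.length = J := by simp [hQ]; omega
  have hsl : s.length = 2 * J + 1 := by simp [hs, hPl, hQl]; omega
  have hQE : Q <:+ E := List.drop_suffix _ _
  have hQs : Q <:+ s := List.suffix_append _ _
  -- for k ≤ J the prefix of s of length k is the prefix of N
  have htake : ∀ k, k ≤ J → s.take k = N.take k := by
    intro k hk
    rw [hs, List.take_append_of_le_length (by simp [hPl]; omega),
        List.take_append_of_le_length (by omega), hP, List.take_take,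
        Nat.min_eq_left hk]
  have hg1 : gBest E N J ≤ J := gBest_le E N J
  have hg2 : N.take (gBest E N J) <:+ E := gBest_suffix E N J
  -- (a) gBest is a border of s
  have ha : gBest E N J ≤ bord s := by
    apply bord_max
    · omega
    · rw [htake _ hg1]
      have h1 : N.take (gBest E N J) <:+ Q :=
        List.suffix_of_suffix_length_le hg2 hQE (by simp [hQl]; omega)
      exact h1.trans hQs
  -- (b) the longest border of s is at most gBest
  have hb : bord s ≤ gBest E N J := by
    set F := bord s with hF
    have hF2 : F ≤ 2 * J := by have := bord_le s; omega
    have hFs : s.take F <:+ s := bord_suffix s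
    have hFJ : F ≤ J := by
      by_contra hgt
      push_neg at hgt
      have heq : s.take F = s.drop (s.length - F) :=
        (take_eq_drop_iff_suffix s F (by omega)).mp hFs
      have h1 : s[J]? = some z := by
        rw [hs, List.getElem?_append_left (by simp [hPl]),
            List.getElem?_append_right (by omega), hPl, Nat.sub_self]
        rfl
      have h2 : s[s.length - F + J]? = Q[2 * J - F]? := by
        rw [hs, List.getElem?_append_right (by simp [hPl]; omega)]
        congr 1
        simp [hPl]
        omega
      have h3 : (s.take F)[J]? = s[J]? := by
        rw [List.getElem?_take, if_pos (by omega)]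
      have h4 : (s.drop (s.length - F))[J]? = s[s.length - F + J]? :=
        List.getElem?_drop
      have h5 : Q[2 * J - F]? = some z := by
        rw [← h2, ← h4, ← heq, h3, h1]
      have : z ∈ Q := List.mem_of_getElem? h5
      exact hzE (hQE.subset this)
    apply gBest_max E N J F hFJ
    have h6 : s.take F <:+ Q :=
      List.suffix_of_suffix_length_le hFs hQs (by simp [hQl, hsl]; omega)
    rw [htake _ hFJ] at h6
    exact h6.trans hQE
  omega

lemma dom_no_z (s : String) (h : pvDomStr s = true) : Char.ofNat 0 ∉ s.toList := by
  intro hm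
  have h2 := List.all_eq_true.mp h _ hm
  have h3 : pvDomChar (Char.ofNat 0) = false := by decide
  rw [h3] at h2
  exact Bool.false_ne_true h2

lemma bord_take_one (t : List Char) : bord (t.take 1) = 0 := by
  have h : (t.take 1).length - 1 = 0 := by simp
  rw [bord, h, Nat.findGreatest_zero]

-- ===== VERDICT (by name: the statement is the Claim_ definition above) =====
theorem merge_continuation_text_spec : Claim_equal_merge_continuation_text := by
  intro existing new_text hDom
  unfold Dom_merge_continuation_text at hDom
  rw [Bool.and_eq_true] at hDom
  have hzE : Char.ofNat 0 ∉ existing.toList := dom_no_z existing hDom.1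
  unfold Spec_merge_continuation_text merge_continuation_text merge_continuation_text_alt
  by_cases hN : new_text = ""
  · simp [hN]
  by_cases hE : existing = ""
  · simp [hE]
  have hN0 : ¬ (PySem.Str.len new_text = 0) := by simp [hN]
  have hE0 : ¬ (PySem.Str.len existing = 0) := by simp [hE]
  rw [if_neg hN0, if_neg hE0, if_neg hN0, if_neg hE0]
  have hEl : 1 ≤ existing.toList.length := by
    rw [PySem.Str.len_eq] at hE0; omega
  have hNl : 1 ≤ new_text.toList.length := by
    rw [PySem.Str.len_eq] at hN0; omega
  have hj : min (min (PySem.Str.len existing) (PySem.Str.len new_text)) 200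
      = ((min (min existing.toList.length new_text.toList.length) 200 : Nat) : Int) := by
    simp only [PySem.Str.len_eq]
    push_cast
    omega
  simp only [hj]
  set J : Nat := min (min existing.toList.length new_text.toList.length) 200 with hJ
  have hJ1 : 1 ≤ J := by omega
  have hJE : J ≤ existing.toList.length := by omega
  have hJN : J ≤ new_text.toList.length := by omega
  have hsliceN : (PySem.Str.slice new_text none (some ((J : Nat) : Int))).toList
      = new_text.toList.take J := by
    rw [PySem.Str.toList_slice, PySem.Chars.slice_eq_listSlice, PySem.List.slice_to_natCast]
  have hfrom : PySem.Str.len existing - ((J : Nat) : Int)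
      = (((existing.toList.length - J : Nat)) : Int) := by
    rw [PySem.Str.len_eq]; omega
  have hsliceE : (PySem.Str.slice existing (some (PySem.Str.len existing - ((J : Nat) : Int))) none).toList
      = existing.toList.drop (existing.toList.length - J) := by
    rw [hfrom, PySem.Str.toList_slice, PySem.Chars.slice_eq_listSlice,
        PySem.List.slice_from_natCast]
  set sL : List Char :=
    (PySem.Str.slice new_text none (some ((J : Nat) : Int))).toList
      ++ [Char.ofNat 0]
      ++ (PySem.Str.slice existing (some (PySem.Str.len existing - ((J : Nat) : Int))) none).toList
    with hsL
  have hsLeq : sL = new_text.toList.take J ++ [Char.ofNat 0]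
      ++ existing.toList.drop (existing.toList.length - J) := by
    rw [hsL, hsliceN, hsliceE]
  have hsLlen : sL.length = 2 * J + 1 := by
    rw [hsLeq]
    simp only [List.length_append, List.length_take, List.length_cons,
      List.length_nil, List.length_drop]
    omega
  have hk : kmpOuter sL 1 [0] 0 = bord sL := by
    have h0 := kmpOuter_spec sL (sL.length - 1) 1 [0] rfl (by omega) (by omega) rfl
      (by
        intro j hj'
        have hj0 : j = 0 := by omega
        subst hj0
        simp [bord_take_one])
    rwa [bord_take_one] at h0
  have hbord : bord sL = gBest existing.toList new_text.toList J := by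
    rw [hsLeq]
    exact bord_sentinel existing.toList new_text.toList J hJE hJN hJ1 hzE
  rw [← String.toList_inj, aLoop_eq existing new_text J]
  rw [String.toList_append, PySem.Str.toList_slice, PySem.Chars.slice_eq_listSlice]
  rw [hk, hbord, PySem.List.slice_from_natCast]
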